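-- pv_equiv track=rewrite | github.com/MrBrantCode/unitest_baseline | mut_generate/mist_train_taco/taco_12371/solution.py | calculate_wind_temperature
-- ===== SOURCE A (Python) =====
-- def calculate_wind_temperature(n, q, s, t, initial_altitudes, movements):
--     def score(d):
--         return -s * d if d > 0 else -t * d
--
--     diff = [initial_altitudes[i + 1] - initial_altitudes[i] for i in range(n)]
--     temp = sum([score(d) for d in diff])
--
--     results = []
--
--     for (l, r, x) in movements:
--         a = diff[l - 1]
--         diff[l - 1] += x
--         temp += score(diff[l - 1]) - score(a)
--
--         if r < n:
--             b = diff[r]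
--             diff[r] -= x
--             temp += score(diff[r]) - score(b)
--
--         results.append(temp)
--
--     return results
-- ===== SOURCE B (Python) =====
-- def calculate_wind_temperature(n, q, s, t, initial_altitudes, movements):
--     # B: keep the diff array and per-query updates, but recompute the
--     # temperature by a full rescan of diff after each movement instead of
--     # maintaining it incrementally.
--     diff = [initial_altitudes[i + 1] - initial_altitudes[i] for i in range(n)]
--     out = []
--     for l, r, x in movements:
--         diff[l - 1] += x
--         if r < n:
--             diff[r] -= x
--         out.append(sum(-s * d if d > 0 else -t * d for d in diff))
--     return out
-- ===== Notes on version B (the rewrite author's own statement) =====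
-- stated objective: alternative
-- what changed: B drops A's incremental temperature maintenance (saved old values a/b and delta updates) and instead rescans the whole diff array after each movement, summing the scores afresh; it trades A's O(n+q) incremental trick for a plainer stateless full-rescan per query.
import Mathlib
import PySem

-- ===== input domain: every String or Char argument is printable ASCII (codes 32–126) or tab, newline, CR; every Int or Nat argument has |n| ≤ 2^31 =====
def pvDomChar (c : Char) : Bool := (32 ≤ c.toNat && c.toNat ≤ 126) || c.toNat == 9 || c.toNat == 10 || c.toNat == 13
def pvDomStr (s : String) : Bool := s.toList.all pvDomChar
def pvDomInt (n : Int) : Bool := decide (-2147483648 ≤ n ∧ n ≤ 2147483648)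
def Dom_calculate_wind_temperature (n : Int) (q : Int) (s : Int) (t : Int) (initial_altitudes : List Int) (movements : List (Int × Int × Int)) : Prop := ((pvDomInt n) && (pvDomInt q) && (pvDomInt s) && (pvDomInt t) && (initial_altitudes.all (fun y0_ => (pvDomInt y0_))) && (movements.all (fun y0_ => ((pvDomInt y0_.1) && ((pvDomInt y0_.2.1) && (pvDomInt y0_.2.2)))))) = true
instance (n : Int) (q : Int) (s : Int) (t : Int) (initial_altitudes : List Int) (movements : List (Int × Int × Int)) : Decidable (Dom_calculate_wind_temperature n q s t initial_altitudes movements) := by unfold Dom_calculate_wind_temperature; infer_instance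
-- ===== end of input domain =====

-- B replaces A's incremental temperature maintenance by a full rescan of the
-- diff array after each movement (alternative decomposition, not faster).


-- ===== PORT A =====
-- score(d) with the closed-over s, t made explicit parameters
def pvScore (s t d : Int) : Int := if d > 0 then -s * d else -t * d

-- the body of A's 'for (l, r, x) in movements' loop, acting on (diff, temp, results)
def pvStepA (n s t : Int) (st : List Int × Int × List Int) (m : Int × Int × Int) :
    List Int × Int × List Int :=
  let a := PySem.List.pyGetD st.1 (m.1 - 1) 0
  let diff := PySem.List.pySetD st.1 (m.1 - 1) (a + m.2.2)
  let temp := st.2.1 + (pvScore s t (PySem.List.pyGetD diff (m.1 - 1) 0) - pvScore s t a)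
  let (diff, temp) :=
    if m.2.1 < n then
      let b := PySem.List.pyGetD diff m.2.1 0
      let diff := PySem.List.pySetD diff m.2.1 (b - m.2.2)
      (diff, temp + (pvScore s t (PySem.List.pyGetD diff m.2.1 0) - pvScore s t b))
    else (diff, temp)
  (diff, temp, st.2.2 ++ [temp])

def calculate_wind_temperature (n : Int) (q : Int) (s : Int) (t : Int) (initial_altitudes : List Int) (movements : List (Int × Int × Int)) : List Int :=
  let diff := (PySem.List.pyRange 0 n 1).map
    (fun i => PySem.List.pyGetD initial_altitudes (i + 1) 0 - PySem.List.pyGetD initial_altitudes i 0)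
  let temp := (diff.map (pvScore s t)).sum
  (movements.foldl (pvStepA n s t) (diff, temp, [])).2.2

-- ===== PORT B =====
-- the body of B's loop: apply the updates, then rescan diff and append the fresh sum
def pvStepB (n s t : Int) (st : List Int × List Int) (m : Int × Int × Int) :
    List Int × List Int :=
  let diff := PySem.List.pySetD st.1 (m.1 - 1) (PySem.List.pyGetD st.1 (m.1 - 1) 0 + m.2.2)
  let diff := if m.2.1 < n then PySem.List.pySetD diff m.2.1 (PySem.List.pyGetD diff m.2.1 0 - m.2.2) else diff
  (diff, st.2 ++ [(diff.map (fun d => if d > 0 then -s * d else -t * d)).sum])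

def calculate_wind_temperature_alt (n : Int) (q : Int) (s : Int) (t : Int) (initial_altitudes : List Int) (movements : List (Int × Int × Int)) : List Int :=
  let diff := (PySem.List.pyRange 0 n 1).map
    (fun i => PySem.List.pyGetD initial_altitudes (i + 1) 0 - PySem.List.pyGetD initial_altitudes i 0)
  (movements.foldl (pvStepB n s t) (diff, [])).2

-- ===== PRECONDITION & SPEC =====
-- Pre_ excludes exactly the inputs where A raises IndexError: building diff needs
-- n < len(initial_altitudes) when n ≥ 1, any movement needs a nonempty diff
-- (so movements = [] when n < 1), and each movement's indices l-1 and (when r < n) r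
-- must be valid Python indices of diff, i.e. 1-n ≤ l ≤ n and -n ≤ r.
def Pre_calculate_wind_temperature (n : Int) (q : Int) (s : Int) (t : Int) (initial_altitudes : List Int) (movements : List (Int × Int × Int)) : Prop :=
  (1 ≤ n → n < (initial_altitudes.length : Int)) ∧
  (n < 1 → movements = []) ∧
  (∀ m ∈ movements, (1 - n ≤ m.1 ∧ m.1 ≤ n) ∧ (m.2.1 < n → -n ≤ m.2.1))
instance (n : Int) (q : Int) (s : Int) (t : Int) (initial_altitudes : List Int) (movements : List (Int × Int × Int)) : Decidable (Pre_calculate_wind_temperature n q s t initial_altitudes movements) := by unfold Pre_calculate_wind_temperature; infer_instance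

def pvWitness_calculate_wind_temperature : Int × Int × Int × Int × List Int × (List (Int × Int × Int)) :=
  (2, 1, 1, 1, [0, 3, 1], [(1, 2, 5)])

def Spec_calculate_wind_temperature (n : Int) (q : Int) (s : Int) (t : Int) (initial_altitudes : List Int) (movements : List (Int × Int × Int)) (out : List Int) : Prop := out = calculate_wind_temperature_alt n q s t initial_altitudes movements
instance (n : Int) (q : Int) (s : Int) (t : Int) (initial_altitudes : List Int) (movements : List (Int × Int × Int)) (out : List Int) : Decidable (Spec_calculate_wind_temperature n q s t initial_altitudes movements out) := by unfold Spec_calculate_wind_temperature; infer_instance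

-- ===== CLAIM (what is proved, stated in full; the proofs are below) =====
def Claim_equal_calculate_wind_temperature : Prop := ∀ (n : Int) (q : Int) (s : Int) (t : Int) (initial_altitudes : List Int) (movements : List (Int × Int × Int)), Dom_calculate_wind_temperature n q s t initial_altitudes movements → Pre_calculate_wind_temperature n q s t initial_altitudes movements → Spec_calculate_wind_temperature n q s t initial_altitudes movements (calculate_wind_temperature n q s t initial_altitudes movements)

-- ===== LEMMAS AND PROOFS =====

theorem pvIdx_some {len : Nat} {i : Int} (h1 : -(len : Int) ≤ i) (h2 : i < (len : Int)) :
    ∃ j : Nat, PySem.List.pyIdx? len i = some j ∧ j < len := by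
  unfold PySem.List.pyIdx?
  by_cases h0 : 0 ≤ i
  · exact ⟨i.toNat, by simp [h0, h2], by omega⟩
  · refine ⟨len - (-i).toNat, by simp [h0, h1], by omega⟩

theorem pvGetD_idx {xs : List Int} {i : Int} {j : Nat} (d : Int)
    (hj : PySem.List.pyIdx? xs.length i = some j) (hjl : j < xs.length) :
    PySem.List.pyGetD xs i d = xs[j] := by
  simp [PySem.List.pyGetD, PySem.List.pyGet?, hj, List.getElem?_eq_getElem hjl]

theorem pvSetD_idx {xs : List Int} {i : Int} {j : Nat} (v : Int)
    (hj : PySem.List.pyIdx? xs.length i = some j) :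
    PySem.List.pySetD xs i v = xs.set j v := by
  simp [PySem.List.pySetD, PySem.List.pySet?, hj]

theorem pvSum_set (ys : List Int) (j : Nat) (w : Int) (hj : j < ys.length) :
    (ys.set j w).sum = ys.sum + w - ys[j] := by
  induction ys generalizing j with
  | nil => simp at hj
  | cons a tl ih =>
    cases j with
    | zero => simp [List.set]; ring
    | succ k =>
      have hk : k < tl.length := by simpa using hj
      simp only [List.set, List.sum_cons, ih k hk, List.getElem_cons_succ]; ring

theorem pvSum_map_set (f : Int → Int) (xs : List Int) (j : Nat) (v : Int) (hj : j < xs.length) :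
    ((xs.set j v).map f).sum = (xs.map f).sum + f v - f xs[j] := by
  rw [List.map_set, pvSum_set (xs.map f) j (f v) (by simpa using hj)]
  simp

-- one update diff[i] := pyGetD diff i 0 + y preserves "sum of scores", read-back included
theorem pvUpdate_sum (f : Int → Int) (xs : List Int) (i y : Int)
    (h1 : -(xs.length : Int) ≤ i) (h2 : i < (xs.length : Int)) :
    ((PySem.List.pySetD xs i (PySem.List.pyGetD xs i 0 + y)).map f).sum
      = (xs.map f).sum + f (PySem.List.pyGetD xs i 0 + y) - f (PySem.List.pyGetD xs i 0) := by
  obtain ⟨j, hj, hjl⟩ := pvIdx_some h1 h2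
  rw [pvSetD_idx _ hj, pvGetD_idx 0 hj hjl, pvSum_map_set f xs j _ hjl]

theorem pvGetD_setD (xs : List Int) (i v : Int)
    (h1 : -(xs.length : Int) ≤ i) (h2 : i < (xs.length : Int)) :
    PySem.List.pyGetD (PySem.List.pySetD xs i v) i 0 = v := by
  obtain ⟨j, hj, hjl⟩ := pvIdx_some h1 h2
  rw [pvSetD_idx _ hj]
  have hj' : PySem.List.pyIdx? ((xs.set j v).length) i = some j := by simpa using hj
  rw [pvGetD_idx 0 hj' (by simpa using hjl)]
  simp [List.getElem_set_self]

theorem pvLen_setD (xs : List Int) (i v : Int) :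
    (PySem.List.pySetD xs i v).length = xs.length := by
  simp [PySem.List.pySetD, PySem.List.pySet?]
  cases PySem.List.pyIdx? xs.length i <;> simp

-- a single movement: A's step returns B's diff, B's rescanned sum as temp, and appends it
theorem pvStep_eq (n s t l r x : Int) (diff res resB : List Int) (temp : Int)
    (hlen : diff.length = n.toNat)
    (hl : 1 - n ≤ l ∧ l ≤ n) (hr : r < n → -n ≤ r)
    (htemp : temp = (diff.map (pvScore s t)).sum) :
    pvStepA n s t (diff, temp, res) (l, r, x)
      = ((pvStepB n s t (diff, resB) (l, r, x)).1,
         ((pvStepB n s t (diff, resB) (l, r, x)).1.map (pvScore s t)).sum,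
         res ++ [((pvStepB n s t (diff, resB) (l, r, x)).1.map (pvScore s t)).sum]) := by
  have hn : 1 ≤ n := by omega
  have hL1 : -(diff.length : Int) ≤ l - 1 := by omega
  have hL2 : l - 1 < (diff.length : Int) := by omega
  have hfun : (fun d => if d > 0 then -s * d else -t * d) = pvScore s t := by
    funext d; rfl
  set d1 := PySem.List.pySetD diff (l - 1) (PySem.List.pyGetD diff (l - 1) 0 + x) with hd1
  have hlen1 : d1.length = diff.length := pvLen_setD _ _ _
  have hsum1 : (d1.map (pvScore s t)).sum
      = (diff.map (pvScore s t)).sum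
        + pvScore s t (PySem.List.pyGetD diff (l - 1) 0 + x)
        - pvScore s t (PySem.List.pyGetD diff (l - 1) 0) :=
    pvUpdate_sum _ _ _ _ hL1 hL2
  have hread1 : PySem.List.pyGetD d1 (l - 1) 0 = PySem.List.pyGetD diff (l - 1) 0 + x :=
    pvGetD_setD _ _ _ hL1 hL2
  by_cases hrc : r < n
  · have hR1 : -(d1.length : Int) ≤ r := by rw [hlen1]; omega
    have hR2 : r < (d1.length : Int) := by rw [hlen1]; omega
    have hsum2 := pvUpdate_sum (pvScore s t) d1 r (-x) hR1 hR2
    have hread2 := pvGetD_setD d1 r (PySem.List.pyGetD d1 r 0 + -x) hR1 hR2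
    simp only [pvStepA, pvStepB, hrc, if_pos, hfun, ← hd1]
    have hbx : PySem.List.pySetD d1 r (PySem.List.pyGetD d1 r 0 - x)
        = PySem.List.pySetD d1 r (PySem.List.pyGetD d1 r 0 + -x) := by ring_nf
    rw [hread1, hbx]
    refine Prod.ext rfl (Prod.ext ?_ ?_) <;>
      simp only [hsum2, hsum1, hread2, htemp] <;> ring_nf
  · simp only [pvStepA, pvStepB, hrc, if_false, hfun, ← hd1]
    rw [hread1]
    refine Prod.ext rfl (Prod.ext ?_ ?_) <;> simp only [hsum1, htemp] <;> ring_nf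

theorem pvLoop_eq (n s t : Int) (movs : List (Int × Int × Int)) (diff res : List Int) (temp : Int)
    (hlen : diff.length = n.toNat)
    (hm : ∀ m ∈ movs, (1 - n ≤ m.1 ∧ m.1 ≤ n) ∧ (m.2.1 < n → -n ≤ m.2.1))
    (htemp : temp = (diff.map (pvScore s t)).sum) :
    (movs.foldl (pvStepA n s t) (diff, temp, res)).2.2
      = (movs.foldl (pvStepB n s t) (diff, res)).2 := by
  induction movs generalizing diff temp res with
  | nil => simp
  | cons m tl ih =>
    obtain ⟨⟨h1, h2⟩, h3⟩ := hm m (List.mem_cons_self)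
    obtain ⟨l, r, x⟩ := m
    have hstep := pvStep_eq n s t l r x diff res res temp hlen ⟨h1, h2⟩ h3 htemp
    simp only [List.foldl_cons, hstep]
    have hdl : (pvStepB n s t (diff, res) (l, r, x)).1.length = n.toNat := by
      simp only [pvStepB]
      by_cases hrc : r < n <;> simp [hrc, hlen]
    exact ih _ _ _ hdl (fun m hmem => hm m (List.mem_cons_of_mem _ hmem)) rfl

theorem pvLen_pyRange_map (n : Int) (f : Int → Int) :
    ((PySem.List.pyRange 0 n 1).map f).length = n.toNat := by
  simp [PySem.List.pyRange]
  omega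

-- ===== VERDICT (by name: the statement is the Claim_ definition above) =====
theorem calculate_wind_temperature_spec : Claim_equal_calculate_wind_temperature := by
  intro n q s t alt movs _ hpre
  obtain ⟨h1, h2, h3⟩ := hpre
  unfold Spec_calculate_wind_temperature calculate_wind_temperature calculate_wind_temperature_alt
  apply pvLoop_eq
  · exact pvLen_pyRange_map n _
  · exact h3
  · rfl
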